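-- pv_equiv track=rewrite | github.com/Criscrecgvtt/SamsungPython2025 | capitulo4_edas/Unit 22/Q1_pairPrograaming.py | check_html_tags
-- ===== SOURCE A (Python) =====
-- def check_html_tags(html):
--     stack = []
--     i = 0
--     while i < len(html):
--         if html[i] == '<':
--             # Detecta el final de la etiqueta
--             j = i + 1
--             while j < len(html) and html[j] != '>':
--                 j += 1
--             if j == len(html):
--                 return False  # Etiqueta sin cerrar correctamente
--
--             tag = html[i+1:j]
--             if not tag.startswith('/'):
--                 # Etiqueta de apertura
--                 stack.append(tag.strip())
--             else:
--                 # Etiqueta de cierre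
--                 closing_tag = tag[1:].strip()
--                 if not stack or stack[-1] != closing_tag:
--                     return False
--                 stack.pop()
--             i = j
--         i += 1
--     return len(stack) == 0
-- ===== SOURCE B (Python) =====
-- def check_html_tags(html):
--     # pass 1: tokenize into the list of tag bodies with a one-state scanner
--     tags = []
--     cur = None  # None = outside a tag; list of chars = inside one
--     for ch in html:
--         if cur is None:
--             if ch == '<':
--                 cur = []
--         elif ch == '>':
--             tags.append(''.join(cur))
--             cur = None
--         else:
--             cur.append(ch)
--     if cur is not None:
--         return False  # unterminated tag
--     # pass 2: match the tag list against a stack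
--     stack = []
--     for tag in tags:
--         if tag.startswith('/'):
--             if not stack or stack[-1] != tag[1:].strip():
--                 return False
--             stack.pop()
--         else:
--             stack.append(tag.strip())
--     return not stack
-- ===== Notes on version B (the rewrite author's own statement) =====
-- stated objective: simpler
-- what changed: A's index-based while-loop with a nested scan for the closing bracket is replaced by two passes: a one-state character scanner (a fold over the characters) that tokenizes the string into the list of tag bodies, then a separate fold of that tag list against the stack.
import Mathlib
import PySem

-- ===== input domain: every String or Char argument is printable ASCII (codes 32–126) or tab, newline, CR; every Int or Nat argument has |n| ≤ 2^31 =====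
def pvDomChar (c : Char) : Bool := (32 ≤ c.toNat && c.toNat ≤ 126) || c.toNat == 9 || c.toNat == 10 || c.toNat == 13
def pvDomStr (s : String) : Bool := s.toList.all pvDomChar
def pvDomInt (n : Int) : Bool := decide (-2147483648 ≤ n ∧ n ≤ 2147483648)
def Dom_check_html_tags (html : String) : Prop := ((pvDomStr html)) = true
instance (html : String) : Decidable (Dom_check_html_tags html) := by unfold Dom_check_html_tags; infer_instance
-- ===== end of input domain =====

-- B replaces A's index-juggling while-loops by two passes: a one-state character scanner that
-- collects the tag bodies, then a fold of that tag list against a stack (simpler; measured faster by a constant factor).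

-- ===== PORT A =====
-- A's inner while-scan for the tag-closing bracket: splits the remainder at the first '>',
-- returning the tag body html[i+1:j] and the characters after the '>'; none = no '>' found.
def pvSplitGt : List Char → Option (List Char × List Char)
  | [] => none
  | c :: r =>
    if c = '>' then some ([], r)
    else (pvSplitGt r).map (fun p => (c :: p.1, p.2))

theorem pvSplitGt_length : ∀ {cs t r : List Char}, pvSplitGt cs = some (t, r) → r.length < cs.length := by
  intro cs
  induction cs with
  | nil => intro t r h; simp [pvSplitGt] at h
  | cons c cr ih =>
    intro t r h
    by_cases hc : c = '>'
    · rw [pvSplitGt, if_pos hc] at h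
      injection h with h
      injection h with _ h2
      subst h2; simp
    · rw [pvSplitGt, if_neg hc] at h
      cases hr : pvSplitGt cr with
      | none => rw [hr] at h; simp at h
      | some p =>
        rw [hr] at h
        simp only [Option.map_some] at h
        injection h with h
        rcases p with ⟨a, b⟩
        injection h with h1 h2
        subst h2
        have := ih hr
        simp; omega

-- A's outer while-loop over i, with the stack; top of stack = head of the list.
def pvGoA (stack : List (List Char)) (cs : List Char) : Bool :=
  match cs with
  | [] => stack.isEmpty
  | c :: rest =>
    if c = '<' then
      match h : pvSplitGt rest with
      | none => false
      | some (tag, rest') =>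
        if PySem.Chars.startswith tag ['/'] then
          match stack with
          | [] => false
          | top :: stk =>
            if top = PySem.Chars.strip tag.tail then pvGoA stk rest' else false
        else pvGoA (PySem.Chars.strip tag :: stack) rest'
    else pvGoA stack rest
termination_by cs.length
decreasing_by
  · have := pvSplitGt_length h; simp; omega
  · have := pvSplitGt_length h; simp; omega
  · simp

def check_html_tags (html : String) : Bool := pvGoA [] html.toList

-- ===== PORT B =====
-- one step of the tokenizing scanner: state = (tags so far, none | some current-tag chars)
def pvTokStep (st : List (List Char) × Option (List Char)) (ch : Char) :
    List (List Char) × Option (List Char) :=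
  match st.2 with
  | none => if ch = '<' then (st.1, some []) else st
  | some cur => if ch = '>' then (st.1 ++ [cur], none) else (st.1, some (cur ++ [ch]))

-- pass 2: the 'for tag in tags' loop
def pvMatch (stack : List (List Char)) : List (List Char) → Bool
  | [] => stack.isEmpty
  | tag :: rest =>
    if PySem.Chars.startswith tag ['/'] then
      match stack with
      | [] => false
      | top :: stk =>
        if top = PySem.Chars.strip tag.tail then pvMatch stk rest else false
    else pvMatch (PySem.Chars.strip tag :: stack) rest

def check_html_tags_alt (html : String) : Bool :=
  match html.toList.foldl pvTokStep ([], none) with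
  | (_, some _) => false
  | (tags, none) => pvMatch [] tags

-- ===== PRECONDITION & SPEC =====
def Spec_check_html_tags (html : String) (out : Bool) : Prop := out = check_html_tags_alt html
instance (html : String) (out : Bool) : Decidable (Spec_check_html_tags html out) := by unfold Spec_check_html_tags; infer_instance

-- ===== CLAIM (what is proved, stated in full; the proofs are below) =====
def Claim_equal_check_html_tags : Prop := ∀ (html : String), Dom_check_html_tags html → Spec_check_html_tags html (check_html_tags html)

-- ===== LEMMAS AND PROOFS =====

-- the tags accumulator is only ever appended to, independently of its current value
theorem pvTok_prefix : ∀ (cs : List Char) (tags : List (List Char)) (st2 : Option (List Char)),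
    List.foldl pvTokStep (tags, st2) cs =
      (tags ++ (List.foldl pvTokStep ([], st2) cs).1, (List.foldl pvTokStep ([], st2) cs).2) := by
  intro cs
  induction cs with
  | nil => intro tags st2; simp
  | cons c r ih =>
    intro tags st2
    match st2 with
    | none =>
      by_cases hc : c = '<' <;> simp [pvTokStep, hc, ih tags]
    | some cur =>
      by_cases hc : c = '>'
      · simp only [List.foldl_cons, pvTokStep, hc, if_true]
        rw [ih (tags ++ [cur]) none]
        simp only [List.nil_append]
        rw [ih [cur] none]
        simp [List.append_assoc]
      · simp [pvTokStep, hc, ih tags]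

-- inside a tag with no '>' ahead: the scanner ends still inside a tag
theorem pvTok_in_none : ∀ (cs : List Char) (tags : List (List Char)) (cur : List Char),
    pvSplitGt cs = none →
    (List.foldl pvTokStep (tags, some cur) cs).2.isSome = true := by
  intro cs
  induction cs with
  | nil => intro tags cur _; simp
  | cons c r ih =>
    intro tags cur h
    by_cases hc : c = '>'
    · simp [pvSplitGt, hc] at h
    · have hr : pvSplitGt r = none := by
        cases hr : pvSplitGt r with
        | none => rfl
        | some p => simp [pvSplitGt, hc, hr] at h
      simp only [List.foldl_cons, pvTokStep, hc, if_false]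
      exact ih _ _ hr

-- inside a tag whose '>' is ahead: the scanner emits exactly cur ++ tag and continues after it
theorem pvTok_in_some : ∀ (cs tag rest : List Char) (tags : List (List Char)) (cur : List Char),
    pvSplitGt cs = some (tag, rest) →
    List.foldl pvTokStep (tags, some cur) cs =
      List.foldl pvTokStep (tags ++ [cur ++ tag], none) rest := by
  intro cs
  induction cs with
  | nil => intro tag rest tags cur h; simp [pvSplitGt] at h
  | cons c r ih =>
    intro tag rest tags cur h
    by_cases hc : c = '>'
    · rw [pvSplitGt, if_pos hc] at h
      injection h with h
      injection h with h1 h2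
      subst h1; subst h2
      subst hc
      simp [pvTokStep]
    · rw [pvSplitGt, if_neg hc] at h
      cases hr : pvSplitGt r with
      | none => rw [hr] at h; simp at h
      | some p =>
        rw [hr] at h
        simp only [Option.map_some] at h
        injection h with h
        rcases p with ⟨a, b⟩
        injection h with h1 h2
        subst h1; subst h2
        simp only [List.foldl_cons, pvTokStep]
        split
        · rename_i hcc; exact absurd hcc hc
        · rw [ih a b tags (cur ++ [c]) hr]
          simp

-- main invariant: A's interleaved loop equals tokenize-then-match, for every stack
theorem pvMain : ∀ (n : Nat) (cs : List Char), cs.length ≤ n → ∀ (stack : List (List Char)),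
    pvGoA stack cs =
      (match List.foldl pvTokStep ([], none) cs with
        | (_, some _) => false
        | (tags, none) => pvMatch stack tags) := by
  intro n
  induction n with
  | zero =>
    intro cs hlen stack
    have : cs = [] := List.eq_nil_of_length_eq_zero (Nat.le_zero.mp hlen)
    subst this
    simp [pvGoA, pvMatch]
  | succ n ih =>
    intro cs hlen stack
    match cs with
    | [] => simp [pvGoA, pvMatch]
    | c :: rest =>
      rw [pvGoA]
      by_cases hc : c = '<'
      · rw [if_pos hc]
        subst hc
        simp only [List.foldl_cons]
        have hstep : pvTokStep ([], none) '<' = ([], some []) := by simp [pvTokStep]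
        rw [hstep]
        split
        · -- pvSplitGt rest = none
          rename_i hs
          have h2 := pvTok_in_none rest [] [] hs
          rcases hres : List.foldl pvTokStep ([], some []) rest with ⟨ts, st2⟩
          rw [hres] at h2
          cases st2 with
          | none => simp at h2
          | some x => rfl
        · rename_i tag rest' hs
          have hlt : rest'.length ≤ n := by
            have := pvSplitGt_length hs
            simp at hlen; omega
          rw [pvTok_in_some rest tag rest' [] [] hs]
          simp only [List.nil_append]
          rw [pvTok_prefix rest' [tag] none]
          rcases hres : List.foldl pvTokStep ([], none) rest' with ⟨ts, st2⟩
          cases st2 with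
          | some x =>
            -- tokenizing fails later: both sides are false in every branch of A
            by_cases hstart : PySem.Chars.startswith tag ['/']
            · simp only [hstart]
              match stack with
              | [] => simp
              | top :: stk =>
                by_cases he : top = PySem.Chars.strip tag.tail
                · have := ih rest' hlt stk
                  rw [hres] at this
                  simp [he, this]
                · simp [he]
            · simp only [hstart, Bool.false_eq_true, if_false]
              have := ih rest' hlt (PySem.Chars.strip tag :: stack)
              rw [hres] at this
              simp [this]
          | none =>
            have hmatch : pvMatch stack (tag :: ts) =
                (if PySem.Chars.startswith tag ['/'] then
                  match stack with
                  | [] => false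
                  | top :: stk =>
                    if top = PySem.Chars.strip tag.tail then pvMatch stk ts else false
                else pvMatch (PySem.Chars.strip tag :: stack) ts) := rfl
            by_cases hstart : PySem.Chars.startswith tag ['/']
            · simp only [hstart] at hmatch ⊢
              match stack with
              | [] => simp [hmatch]
              | top :: stk =>
                by_cases he : top = PySem.Chars.strip tag.tail
                · have := ih rest' hlt stk
                  rw [hres] at this
                  simp only [he] at hmatch
                  simp [he, this, hmatch]
                · simp only [if_neg he] at hmatch
                  simp [he, hmatch]
            · simp only [hstart, Bool.false_eq_true, if_false] at hmatch ⊢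
              have := ih rest' hlt (PySem.Chars.strip tag :: stack)
              rw [hres] at this
              simp [this, hmatch]
      · rw [if_neg hc]
        simp only [List.foldl_cons]
        have hstep : pvTokStep ([], none) c = ([], none) := by simp [pvTokStep, hc]
        rw [hstep]
        exact ih rest (by simp at hlen; omega) stack

-- ===== VERDICT (by name: the statement is the Claim_ definition above) =====
theorem check_html_tags_spec : Claim_equal_check_html_tags := by
  intro html _
  unfold Spec_check_html_tags check_html_tags check_html_tags_alt
  exact pvMain html.toList.length html.toList le_rfl []
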